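-- pv_equiv track=rewrite | github.com/Twodragon0/tech-blog | scripts/news/svg_generator.py | _card_icon_svg
-- ===== SOURCE A (Python) =====
-- def _card_icon_svg(label: str, color: str) -> str:
--     """Return a small inline SVG icon glyph for a card, keyed on label content."""
--     lbl = label.lower()
--     if any(k in lbl for k in ["apt", "ta4", "ta41", "dprk", "lazarus", "cozy"]):
--         # Spy/actor icon: eye shape
--         return (
--             f'<ellipse cx="0" cy="-4" rx="14" ry="9" fill="none" stroke="{color}" stroke-width="1.8"/>'
--             f'<circle cx="0" cy="-4" r="4" fill="{color}" opacity="0.7"/>'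
--         )
--     if any(k in lbl for k in ["cve", "zero-day", "vuln", "patch"]):
--         # Warning triangle + CVE text
--         return (
--             f'<path d="M0,-18 L16,12 L-16,12 Z" fill="none" stroke="{color}" stroke-width="1.8"/>'
--             f'<text x="0" y="6" font-family="Courier New" font-size="9" font-weight="700" fill="{color}" text-anchor="middle">CVE</text>'
--         )
--     if any(k in lbl for k in ["ransom", "lock"]):
--         # Padlock
--         return (
--             f'<rect x="-12" y="-2" width="24" height="20" rx="4" fill="none" stroke="{color}" stroke-width="1.8"/>'
--             f'<path d="M-8,-2 v-10 c0-12 16-12 16,0 v10" stroke="{color}" stroke-width="2.2" fill="none" stroke-linecap="round"/>'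
--             f'<circle cx="0" cy="8" r="3" fill="{color}"/>'
--         )
--     if any(k in lbl for k in ["malware", "botnet", "worm", "trojan"]):
--         # Bug/malware icon: circle with legs
--         return (
--             f'<circle cx="0" cy="-2" r="10" fill="none" stroke="{color}" stroke-width="1.8"/>'
--             f'<line x1="-10" y1="-8" x2="-18" y2="-14" stroke="{color}" stroke-width="1.5"/>'
--             f'<line x1="10" y1="-8" x2="18" y2="-14" stroke="{color}" stroke-width="1.5"/>'
--             f'<line x1="-10" y1="2" x2="-18" y2="2" stroke="{color}" stroke-width="1.5"/>'
--             f'<line x1="10" y1="2" x2="18" y2="2" stroke="{color}" stroke-width="1.5"/>'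
--         )
--     if any(k in lbl for k in ["phish", "social"]):
--         # Hook shape
--         return (
--             f'<path d="M-8,-14 C-8,-20 8,-20 8,-14 L8,6 C8,16 -8,16 -8,6 Z" fill="none" stroke="{color}" stroke-width="1.8"/>'
--             f'<path d="M8,6 L18,16" stroke="{color}" stroke-width="2.5" stroke-linecap="round"/>'
--         )
--     if any(k in lbl for k in ["docker", "container"]):
--         # Docker whale outline (simplified stacked boxes)
--         return (
--             f'<rect x="-14" y="-16" width="10" height="8" rx="2" fill="none" stroke="{color}" stroke-width="1.5"/>'
--             f'<rect x="-2" y="-16" width="10" height="8" rx="2" fill="none" stroke="{color}" stroke-width="1.5"/>'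
--             f'<rect x="-14" y="-6" width="10" height="8" rx="2" fill="none" stroke="{color}" stroke-width="1.5"/>'
--             f'<rect x="-2" y="-6" width="10" height="8" rx="2" fill="none" stroke="{color}" stroke-width="1.5"/>'
--             f'<path d="M-16,8 C-10,18 10,18 16,8" fill="none" stroke="{color}" stroke-width="1.5"/>'
--         )
--     if any(k in lbl for k in ["aws", "cloud", "gcp", "azure"]):
--         # Cloud shape
--         return (
--             f'<path d="M-16,8 C-24,8 -26,-2 -20,-8 C-18,-18 -6,-22 4,-18 C8,-26 20,-26 24,-16 C30,-16 32,-8 28,0 C26,8 16,8 8,8 Z" '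
--             f'fill="none" stroke="{color}" stroke-width="1.8" transform="scale(0.65)"/>'
--         )
--     if any(k in lbl for k in ["k8s", "kube"]):
--         # Kubernetes helm/wheel
--         return (
--             f'<circle cx="0" cy="0" r="10" fill="none" stroke="{color}" stroke-width="1.8"/>'
--             f'<circle cx="0" cy="0" r="4" fill="{color}" opacity="0.5"/>'
--             f'<line x1="0" y1="-10" x2="0" y2="-18" stroke="{color}" stroke-width="2"/>'
--             f'<line x1="8.7" y1="5" x2="15.6" y2="9" stroke="{color}" stroke-width="2"/>'
--             f'<line x1="-8.7" y1="5" x2="-15.6" y2="9" stroke="{color}" stroke-width="2"/>'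
--         )
--     if any(k in lbl for k in ["ai", "llm", "agent", "model"]):
--         # Neural net nodes
--         return (
--             f'<circle cx="-12" cy="-8" r="4" fill="none" stroke="{color}" stroke-width="1.5"/>'
--             f'<circle cx="12" cy="-8" r="4" fill="none" stroke="{color}" stroke-width="1.5"/>'
--             f'<circle cx="0" cy="8" r="5" fill="none" stroke="{color}" stroke-width="1.8"/>'
--             f'<line x1="-8" y1="-6" x2="-2" y2="6" stroke="{color}" stroke-width="1.2" opacity="0.7"/>'
--             f'<line x1="8" y1="-6" x2="2" y2="6" stroke="{color}" stroke-width="1.2" opacity="0.7"/>'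
--             f'<line x1="-8" y1="-8" x2="8" y2="-8" stroke="{color}" stroke-width="1.2" opacity="0.5"/>'
--         )
--     if any(k in lbl for k in ["supply", "npm", "pypi"]):
--         # Chain links
--         return (
--             f'<ellipse cx="-8" cy="0" rx="10" ry="6" fill="none" stroke="{color}" stroke-width="1.8"/>'
--             f'<ellipse cx="8" cy="0" rx="10" ry="6" fill="none" stroke="{color}" stroke-width="1.8"/>'
--         )
--     if any(k in lbl for k in ["dns"]):
--         # Globe outline
--         return (
--             f'<circle cx="0" cy="0" r="14" fill="none" stroke="{color}" stroke-width="1.5"/>'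
--             f'<ellipse cx="0" cy="0" rx="7" ry="14" fill="none" stroke="{color}" stroke-width="1"/>'
--             f'<line x1="-14" y1="0" x2="14" y2="0" stroke="{color}" stroke-width="1" opacity="0.6"/>'
--         )
--     # Default: shield
--     return (
--         f'<path d="M0,-16 L14,-8 L14,4 C14,12 8,16 0,20 C-8,16 -14,12 -14,4 L-14,-8 Z" '
--         f'fill="none" stroke="{color}" stroke-width="1.8"/>'
--     )
-- ===== SOURCE B (Python) =====
-- # B: instead of testing keyword groups one by one, scan the lowered label once,
-- # position by position, and keep the smallest icon priority of any keyword that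
-- # starts there; render the template of that priority (11 = shield default).
--
-- _KEYWORDS = [
--     ("apt", 0), ("ta4", 0), ("ta41", 0), ("dprk", 0), ("lazarus", 0), ("cozy", 0),
--     ("cve", 1), ("zero-day", 1), ("vuln", 1), ("patch", 1),
--     ("ransom", 2), ("lock", 2),
--     ("malware", 3), ("botnet", 3), ("worm", 3), ("trojan", 3),
--     ("phish", 4), ("social", 4),
--     ("docker", 5), ("container", 5),
--     ("aws", 6), ("cloud", 6), ("gcp", 6), ("azure", 6),
--     ("k8s", 7), ("kube", 7),
--     ("ai", 8), ("llm", 8), ("agent", 8), ("model", 8),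
--     ("supply", 9), ("npm", 9), ("pypi", 9),
--     ("dns", 10),
-- ]
--
-- _TEMPLATES = (
--     lambda c: f'<ellipse cx="0" cy="-4" rx="14" ry="9" fill="none" stroke="{c}" stroke-width="1.8"/><circle cx="0" cy="-4" r="4" fill="{c}" opacity="0.7"/>',
--     lambda c: f'<path d="M0,-18 L16,12 L-16,12 Z" fill="none" stroke="{c}" stroke-width="1.8"/><text x="0" y="6" font-family="Courier New" font-size="9" font-weight="700" fill="{c}" text-anchor="middle">CVE</text>',
--     lambda c: f'<rect x="-12" y="-2" width="24" height="20" rx="4" fill="none" stroke="{c}" stroke-width="1.8"/><path d="M-8,-2 v-10 c0-12 16-12 16,0 v10" stroke="{c}" stroke-width="2.2" fill="none" stroke-linecap="round"/><circle cx="0" cy="8" r="3" fill="{c}"/>',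
--     lambda c: f'<circle cx="0" cy="-2" r="10" fill="none" stroke="{c}" stroke-width="1.8"/><line x1="-10" y1="-8" x2="-18" y2="-14" stroke="{c}" stroke-width="1.5"/><line x1="10" y1="-8" x2="18" y2="-14" stroke="{c}" stroke-width="1.5"/><line x1="-10" y1="2" x2="-18" y2="2" stroke="{c}" stroke-width="1.5"/><line x1="10" y1="2" x2="18" y2="2" stroke="{c}" stroke-width="1.5"/>',
--     lambda c: f'<path d="M-8,-14 C-8,-20 8,-20 8,-14 L8,6 C8,16 -8,16 -8,6 Z" fill="none" stroke="{c}" stroke-width="1.8"/><path d="M8,6 L18,16" stroke="{c}" stroke-width="2.5" stroke-linecap="round"/>',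
--     lambda c: f'<rect x="-14" y="-16" width="10" height="8" rx="2" fill="none" stroke="{c}" stroke-width="1.5"/><rect x="-2" y="-16" width="10" height="8" rx="2" fill="none" stroke="{c}" stroke-width="1.5"/><rect x="-14" y="-6" width="10" height="8" rx="2" fill="none" stroke="{c}" stroke-width="1.5"/><rect x="-2" y="-6" width="10" height="8" rx="2" fill="none" stroke="{c}" stroke-width="1.5"/><path d="M-16,8 C-10,18 10,18 16,8" fill="none" stroke="{c}" stroke-width="1.5"/>',
--     lambda c: f'<path d="M-16,8 C-24,8 -26,-2 -20,-8 C-18,-18 -6,-22 4,-18 C8,-26 20,-26 24,-16 C30,-16 32,-8 28,0 C26,8 16,8 8,8 Z" fill="none" stroke="{c}" stroke-width="1.8" transform="scale(0.65)"/>',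
--     lambda c: f'<circle cx="0" cy="0" r="10" fill="none" stroke="{c}" stroke-width="1.8"/><circle cx="0" cy="0" r="4" fill="{c}" opacity="0.5"/><line x1="0" y1="-10" x2="0" y2="-18" stroke="{c}" stroke-width="2"/><line x1="8.7" y1="5" x2="15.6" y2="9" stroke="{c}" stroke-width="2"/><line x1="-8.7" y1="5" x2="-15.6" y2="9" stroke="{c}" stroke-width="2"/>',
--     lambda c: f'<circle cx="-12" cy="-8" r="4" fill="none" stroke="{c}" stroke-width="1.5"/><circle cx="12" cy="-8" r="4" fill="none" stroke="{c}" stroke-width="1.5"/><circle cx="0" cy="8" r="5" fill="none" stroke="{c}" stroke-width="1.8"/><line x1="-8" y1="-6" x2="-2" y2="6" stroke="{c}" stroke-width="1.2" opacity="0.7"/><line x1="8" y1="-6" x2="2" y2="6" stroke="{c}" stroke-width="1.2" opacity="0.7"/><line x1="-8" y1="-8" x2="8" y2="-8" stroke="{c}" stroke-width="1.2" opacity="0.5"/>',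
--     lambda c: f'<ellipse cx="-8" cy="0" rx="10" ry="6" fill="none" stroke="{c}" stroke-width="1.8"/><ellipse cx="8" cy="0" rx="10" ry="6" fill="none" stroke="{c}" stroke-width="1.8"/>',
--     lambda c: f'<circle cx="0" cy="0" r="14" fill="none" stroke="{c}" stroke-width="1.5"/><ellipse cx="0" cy="0" rx="7" ry="14" fill="none" stroke="{c}" stroke-width="1"/><line x1="-14" y1="0" x2="14" y2="0" stroke="{c}" stroke-width="1" opacity="0.6"/>',
--     lambda c: f'<path d="M0,-16 L14,-8 L14,4 C14,12 8,16 0,20 C-8,16 -14,12 -14,4 L-14,-8 Z" fill="none" stroke="{c}" stroke-width="1.8"/>',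
-- )
--
--
-- def _card_icon_svg(label: str, color: str) -> str:
--     lbl = label.lower()
--     best = 11  # shield default
--     for i in range(len(lbl)):
--         for kw, pri in _KEYWORDS:
--             if pri < best and lbl.startswith(kw, i):
--                 best = pri
--     return _TEMPLATES[best](color)
-- ===== Notes on version B (the rewrite author's own statement) =====
-- stated objective: alternative
-- what changed: Instead of testing the eleven keyword groups one after another with any(k in lbl), B scans the lowered label once, position by position, keeping the minimum icon priority over a flat keyword-to-priority table of keywords that start at each position, then renders that priority's template.
import Mathlib
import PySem

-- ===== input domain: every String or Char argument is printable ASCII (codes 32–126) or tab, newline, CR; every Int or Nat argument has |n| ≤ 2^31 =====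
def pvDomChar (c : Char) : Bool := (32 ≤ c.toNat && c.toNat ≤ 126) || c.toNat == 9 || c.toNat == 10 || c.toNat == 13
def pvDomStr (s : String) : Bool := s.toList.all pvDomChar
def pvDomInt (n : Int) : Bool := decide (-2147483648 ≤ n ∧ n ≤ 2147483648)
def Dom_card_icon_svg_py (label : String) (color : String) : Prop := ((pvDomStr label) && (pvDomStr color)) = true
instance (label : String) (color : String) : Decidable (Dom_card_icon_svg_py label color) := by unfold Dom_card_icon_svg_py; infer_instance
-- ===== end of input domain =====

set_option maxRecDepth 8000
set_option maxHeartbeats 1000000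


-- B replaces A's group-by-group keyword cascade by a single left-to-right scan of the lowered
-- label that keeps the minimum icon priority of any keyword starting at each position, then
-- renders that priority's template (objective: alternative; same cost).

-- ===== PORT A =====

def card_icon_svg_py (label : String) (color : String) : String :=
  let lbl := PySem.Str.lower label
  if (["apt", "ta4", "ta41", "dprk", "lazarus", "cozy"]).any (fun k => PySem.Str.isIn k lbl) then
    "<ellipse cx=\"0\" cy=\"-4\" rx=\"14\" ry=\"9\" fill=\"none\" stroke=\"" ++ color ++ "\" stroke-width=\"1.8\"/><circle cx=\"0\" cy=\"-4\" r=\"4\" fill=\"" ++ color ++ "\" opacity=\"0.7\"/>"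
  else
  if (["cve", "zero-day", "vuln", "patch"]).any (fun k => PySem.Str.isIn k lbl) then
    "<path d=\"M0,-18 L16,12 L-16,12 Z\" fill=\"none\" stroke=\"" ++ color ++ "\" stroke-width=\"1.8\"/><text x=\"0\" y=\"6\" font-family=\"Courier New\" font-size=\"9\" font-weight=\"700\" fill=\"" ++ color ++ "\" text-anchor=\"middle\">CVE</text>"
  else
  if (["ransom", "lock"]).any (fun k => PySem.Str.isIn k lbl) then
    "<rect x=\"-12\" y=\"-2\" width=\"24\" height=\"20\" rx=\"4\" fill=\"none\" stroke=\"" ++ color ++ "\" stroke-width=\"1.8\"/><path d=\"M-8,-2 v-10 c0-12 16-12 16,0 v10\" stroke=\"" ++ color ++ "\" stroke-width=\"2.2\" fill=\"none\" stroke-linecap=\"round\"/><circle cx=\"0\" cy=\"8\" r=\"3\" fill=\"" ++ color ++ "\"/>"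
  else
  if (["malware", "botnet", "worm", "trojan"]).any (fun k => PySem.Str.isIn k lbl) then
    "<circle cx=\"0\" cy=\"-2\" r=\"10\" fill=\"none\" stroke=\"" ++ color ++ "\" stroke-width=\"1.8\"/><line x1=\"-10\" y1=\"-8\" x2=\"-18\" y2=\"-14\" stroke=\"" ++ color ++ "\" stroke-width=\"1.5\"/><line x1=\"10\" y1=\"-8\" x2=\"18\" y2=\"-14\" stroke=\"" ++ color ++ "\" stroke-width=\"1.5\"/><line x1=\"-10\" y1=\"2\" x2=\"-18\" y2=\"2\" stroke=\"" ++ color ++ "\" stroke-width=\"1.5\"/><line x1=\"10\" y1=\"2\" x2=\"18\" y2=\"2\" stroke=\"" ++ color ++ "\" stroke-width=\"1.5\"/>"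
  else
  if (["phish", "social"]).any (fun k => PySem.Str.isIn k lbl) then
    "<path d=\"M-8,-14 C-8,-20 8,-20 8,-14 L8,6 C8,16 -8,16 -8,6 Z\" fill=\"none\" stroke=\"" ++ color ++ "\" stroke-width=\"1.8\"/><path d=\"M8,6 L18,16\" stroke=\"" ++ color ++ "\" stroke-width=\"2.5\" stroke-linecap=\"round\"/>"
  else
  if (["docker", "container"]).any (fun k => PySem.Str.isIn k lbl) then
    "<rect x=\"-14\" y=\"-16\" width=\"10\" height=\"8\" rx=\"2\" fill=\"none\" stroke=\"" ++ color ++ "\" stroke-width=\"1.5\"/><rect x=\"-2\" y=\"-16\" width=\"10\" height=\"8\" rx=\"2\" fill=\"none\" stroke=\"" ++ color ++ "\" stroke-width=\"1.5\"/><rect x=\"-14\" y=\"-6\" width=\"10\" height=\"8\" rx=\"2\" fill=\"none\" stroke=\"" ++ color ++ "\" stroke-width=\"1.5\"/><rect x=\"-2\" y=\"-6\" width=\"10\" height=\"8\" rx=\"2\" fill=\"none\" stroke=\"" ++ color ++ "\" stroke-width=\"1.5\"/><path d=\"M-16,8 C-10,18 10,18 16,8\" fill=\"none\" stroke=\"" ++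 color ++ "\" stroke-width=\"1.5\"/>"
  else
  if (["aws", "cloud", "gcp", "azure"]).any (fun k => PySem.Str.isIn k lbl) then
    "<path d=\"M-16,8 C-24,8 -26,-2 -20,-8 C-18,-18 -6,-22 4,-18 C8,-26 20,-26 24,-16 C30,-16 32,-8 28,0 C26,8 16,8 8,8 Z\" fill=\"none\" stroke=\"" ++ color ++ "\" stroke-width=\"1.8\" transform=\"scale(0.65)\"/>"
  else
  if (["k8s", "kube"]).any (fun k => PySem.Str.isIn k lbl) then
    "<circle cx=\"0\" cy=\"0\" r=\"10\" fill=\"none\" stroke=\"" ++ color ++ "\" stroke-width=\"1.8\"/><circle cx=\"0\" cy=\"0\" r=\"4\" fill=\"" ++ color ++ "\" opacity=\"0.5\"/><line x1=\"0\" y1=\"-10\" x2=\"0\" y2=\"-18\" stroke=\"" ++ color ++ "\" stroke-width=\"2\"/><line x1=\"8.7\" y1=\"5\" x2=\"15.6\" y2=\"9\" stroke=\"" ++ color ++ "\" stroke-width=\"2\"/><line x1=\"-8.7\" y1=\"5\" x2=\"-15.6\" y2=\"9\" stroke=\"" ++ color ++ "\" stroke-width=\"2\"/>"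
  else
  if (["ai", "llm", "agent", "model"]).any (fun k => PySem.Str.isIn k lbl) then
    "<circle cx=\"-12\" cy=\"-8\" r=\"4\" fill=\"none\" stroke=\"" ++ color ++ "\" stroke-width=\"1.5\"/><circle cx=\"12\" cy=\"-8\" r=\"4\" fill=\"none\" stroke=\"" ++ color ++ "\" stroke-width=\"1.5\"/><circle cx=\"0\" cy=\"8\" r=\"5\" fill=\"none\" stroke=\"" ++ color ++ "\" stroke-width=\"1.8\"/><line x1=\"-8\" y1=\"-6\" x2=\"-2\" y2=\"6\" stroke=\"" ++ color ++ "\" stroke-width=\"1.2\" opacity=\"0.7\"/><line x1=\"8\" y1=\"-6\" x2=\"2\" y2=\"6\" stroke=\"" ++ color ++ "\" stroke-width=\"1.2\" opacity=\"0.7\"/><line x1=\"-8\" y1=\"-8\" x2=\"8\" y2=\"-8\" stroke=\"" ++ color ++ "\" stroke-width=\"1.2\" opacity=\"0.5\"/>"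
  else
  if (["supply", "npm", "pypi"]).any (fun k => PySem.Str.isIn k lbl) then
    "<ellipse cx=\"-8\" cy=\"0\" rx=\"10\" ry=\"6\" fill=\"none\" stroke=\"" ++ color ++ "\" stroke-width=\"1.8\"/><ellipse cx=\"8\" cy=\"0\" rx=\"10\" ry=\"6\" fill=\"none\" stroke=\"" ++ color ++ "\" stroke-width=\"1.8\"/>"
  else
  if (["dns"]).any (fun k => PySem.Str.isIn k lbl) then
    "<circle cx=\"0\" cy=\"0\" r=\"14\" fill=\"none\" stroke=\"" ++ color ++ "\" stroke-width=\"1.5\"/><ellipse cx=\"0\" cy=\"0\" rx=\"7\" ry=\"14\" fill=\"none\" stroke=\"" ++ color ++ "\" stroke-width=\"1\"/><line x1=\"-14\" y1=\"0\" x2=\"14\" y2=\"0\" stroke=\"" ++ color ++ "\" stroke-width=\"1\" opacity=\"0.6\"/>"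
  else
    "<path d=\"M0,-16 L14,-8 L14,4 C14,12 8,16 0,20 C-8,16 -14,12 -14,4 L-14,-8 Z\" fill=\"none\" stroke=\"" ++ color ++ "\" stroke-width=\"1.8\"/>"


-- ===== PORT B =====

-- flat keyword → icon-priority table (_KEYWORDS in Source B)
def pvKW : List (String × Nat) := [("apt", 0),
  ("ta4", 0),
  ("ta41", 0),
  ("dprk", 0),
  ("lazarus", 0),
  ("cozy", 0),
  ("cve", 1),
  ("zero-day", 1),
  ("vuln", 1),
  ("patch", 1),
  ("ransom", 2),
  ("lock", 2),
  ("malware", 3),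
  ("botnet", 3),
  ("worm", 3),
  ("trojan", 3),
  ("phish", 4),
  ("social", 4),
  ("docker", 5),
  ("container", 5),
  ("aws", 6),
  ("cloud", 6),
  ("gcp", 6),
  ("azure", 6),
  ("k8s", 7),
  ("kube", 7),
  ("ai", 8),
  ("llm", 8),
  ("agent", 8),
  ("model", 8),
  ("supply", 9),
  ("npm", 9),
  ("pypi", 9),
  ("dns", 10)]

-- _TEMPLATES in Source B: priority → rendered icon (11 and beyond = shield default)
def pvTemplate (best : Nat) (color : String) : String :=
  match best with
  | 0 => "<ellipse cx=\"0\" cy=\"-4\" rx=\"14\" ry=\"9\" fill=\"none\" stroke=\"" ++ color ++ "\" stroke-width=\"1.8\"/><circle cx=\"0\" cy=\"-4\" r=\"4\" fill=\"" ++ color ++ "\" opacity=\"0.7\"/>"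
  | 1 => "<path d=\"M0,-18 L16,12 L-16,12 Z\" fill=\"none\" stroke=\"" ++ color ++ "\" stroke-width=\"1.8\"/><text x=\"0\" y=\"6\" font-family=\"Courier New\" font-size=\"9\" font-weight=\"700\" fill=\"" ++ color ++ "\" text-anchor=\"middle\">CVE</text>"
  | 2 => "<rect x=\"-12\" y=\"-2\" width=\"24\" height=\"20\" rx=\"4\" fill=\"none\" stroke=\"" ++ color ++ "\" stroke-width=\"1.8\"/><path d=\"M-8,-2 v-10 c0-12 16-12 16,0 v10\" stroke=\"" ++ color ++ "\" stroke-width=\"2.2\" fill=\"none\" stroke-linecap=\"round\"/><circle cx=\"0\" cy=\"8\" r=\"3\" fill=\"" ++ color ++ "\"/>"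
  | 3 => "<circle cx=\"0\" cy=\"-2\" r=\"10\" fill=\"none\" stroke=\"" ++ color ++ "\" stroke-width=\"1.8\"/><line x1=\"-10\" y1=\"-8\" x2=\"-18\" y2=\"-14\" stroke=\"" ++ color ++ "\" stroke-width=\"1.5\"/><line x1=\"10\" y1=\"-8\" x2=\"18\" y2=\"-14\" stroke=\"" ++ color ++ "\" stroke-width=\"1.5\"/><line x1=\"-10\" y1=\"2\" x2=\"-18\" y2=\"2\" stroke=\"" ++ color ++ "\" stroke-width=\"1.5\"/><line x1=\"10\" y1=\"2\" x2=\"18\" y2=\"2\" stroke=\"" ++ color ++ "\" stroke-width=\"1.5\"/>"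
  | 4 => "<path d=\"M-8,-14 C-8,-20 8,-20 8,-14 L8,6 C8,16 -8,16 -8,6 Z\" fill=\"none\" stroke=\"" ++ color ++ "\" stroke-width=\"1.8\"/><path d=\"M8,6 L18,16\" stroke=\"" ++ color ++ "\" stroke-width=\"2.5\" stroke-linecap=\"round\"/>"
  | 5 => "<rect x=\"-14\" y=\"-16\" width=\"10\" height=\"8\" rx=\"2\" fill=\"none\" stroke=\"" ++ color ++ "\" stroke-width=\"1.5\"/><rect x=\"-2\" y=\"-16\" width=\"10\" height=\"8\" rx=\"2\" fill=\"none\" stroke=\"" ++ color ++ "\" stroke-width=\"1.5\"/><rect x=\"-14\" y=\"-6\" width=\"10\" height=\"8\" rx=\"2\" fill=\"none\" stroke=\"" ++ color ++ "\" stroke-width=\"1.5\"/><rect x=\"-2\" y=\"-6\" width=\"10\" height=\"8\" rx=\"2\" fill=\"none\" stroke=\"" ++ color ++ "\" stroke-width=\"1.5\"/><path d=\"M-16,8 C-10,18 10,18 16,8\" fill=\"none\" stroke=\"" ++ color ++ "\" stroke-width=\"1.5\"/>"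
  | 6 => "<path d=\"M-16,8 C-24,8 -26,-2 -20,-8 C-18,-18 -6,-22 4,-18 C8,-26 20,-26 24,-16 C30,-16 32,-8 28,0 C26,8 16,8 8,8 Z\" fill=\"none\" stroke=\"" ++ color ++ "\" stroke-width=\"1.8\" transform=\"scale(0.65)\"/>"
  | 7 => "<circle cx=\"0\" cy=\"0\" r=\"10\" fill=\"none\" stroke=\"" ++ color ++ "\" stroke-width=\"1.8\"/><circle cx=\"0\" cy=\"0\" r=\"4\" fill=\"" ++ color ++ "\" opacity=\"0.5\"/><line x1=\"0\" y1=\"-10\" x2=\"0\" y2=\"-18\" stroke=\"" ++ color ++ "\" stroke-width=\"2\"/><line x1=\"8.7\" y1=\"5\" x2=\"15.6\" y2=\"9\" stroke=\"" ++ color ++ "\" stroke-width=\"2\"/><line x1=\"-8.7\" y1=\"5\" x2=\"-15.6\" y2=\"9\" stroke=\"" ++ color ++ "\" stroke-width=\"2\"/>"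
  | 8 => "<circle cx=\"-12\" cy=\"-8\" r=\"4\" fill=\"none\" stroke=\"" ++ color ++ "\" stroke-width=\"1.5\"/><circle cx=\"12\" cy=\"-8\" r=\"4\" fill=\"none\" stroke=\"" ++ color ++ "\" stroke-width=\"1.5\"/><circle cx=\"0\" cy=\"8\" r=\"5\" fill=\"none\" stroke=\"" ++ color ++ "\" stroke-width=\"1.8\"/><line x1=\"-8\" y1=\"-6\" x2=\"-2\" y2=\"6\" stroke=\"" ++ color ++ "\" stroke-width=\"1.2\" opacity=\"0.7\"/><line x1=\"8\" y1=\"-6\" x2=\"2\" y2=\"6\" stroke=\"" ++ color ++ "\" stroke-width=\"1.2\" opacity=\"0.7\"/><line x1=\"-8\" y1=\"-8\" x2=\"8\" y2=\"-8\" stroke=\"" ++ color ++ "\" stroke-width=\"1.2\" opacity=\"0.5\"/>"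
  | 9 => "<ellipse cx=\"-8\" cy=\"0\" rx=\"10\" ry=\"6\" fill=\"none\" stroke=\"" ++ color ++ "\" stroke-width=\"1.8\"/><ellipse cx=\"8\" cy=\"0\" rx=\"10\" ry=\"6\" fill=\"none\" stroke=\"" ++ color ++ "\" stroke-width=\"1.8\"/>"
  | 10 => "<circle cx=\"0\" cy=\"0\" r=\"14\" fill=\"none\" stroke=\"" ++ color ++ "\" stroke-width=\"1.5\"/><ellipse cx=\"0\" cy=\"0\" rx=\"7\" ry=\"14\" fill=\"none\" stroke=\"" ++ color ++ "\" stroke-width=\"1\"/><line x1=\"-14\" y1=\"0\" x2=\"14\" y2=\"0\" stroke=\"" ++ color ++ "\" stroke-width=\"1\" opacity=\"0.6\"/>"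
  | _ => "<path d=\"M0,-16 L14,-8 L14,4 C14,12 8,16 0,20 C-8,16 -14,12 -14,4 L-14,-8 Z\" fill=\"none\" stroke=\"" ++ color ++ "\" stroke-width=\"1.8\"/>"

-- inner loop: for kw, pri in _KEYWORDS: if pri < best and lbl.startswith(kw, i): best = pri
def pvBestAt (suffix : List Char) (best : Nat) : Nat :=
  pvKW.foldl (fun b kp => if kp.2 < b && kp.1.toList.isPrefixOf suffix then kp.2 else b) best

-- outer loop: for i in range(len(lbl)) — one iteration per nonempty suffix of lbl
def pvScan (l : List Char) (best : Nat) : Nat :=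
  match l with
  | [] => best
  | c :: rest => pvScan rest (pvBestAt (c :: rest) best)

def card_icon_svg_py_alt (label : String) (color : String) : String :=
  pvTemplate (pvScan (PySem.Str.lower label).toList 11) color

-- ===== PRECONDITION & SPEC =====
def Spec_card_icon_svg_py (label : String) (color : String) (out : String) : Prop := out = card_icon_svg_py_alt label color
instance (label : String) (color : String) (out : String) : Decidable (Spec_card_icon_svg_py label color out) := by unfold Spec_card_icon_svg_py; infer_instance

-- ===== CLAIM =====
def Claim_equal_card_icon_svg_py : Prop := ∀ (label : String) (color : String), Dom_card_icon_svg_py label color → Spec_card_icon_svg_py label color (card_icon_svg_py label color)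

-- ===== LEMMAS AND PROOFS =====

-- the keyword groups of A's cascade, indexed by priority (proof-side view of pvKW)
def pvGrp : Nat → List String
  | 0 => ["apt", "ta4", "ta41", "dprk", "lazarus", "cozy"]
  | 1 => ["cve", "zero-day", "vuln", "patch"]
  | 2 => ["ransom", "lock"]
  | 3 => ["malware", "botnet", "worm", "trojan"]
  | 4 => ["phish", "social"]
  | 5 => ["docker", "container"]
  | 6 => ["aws", "cloud", "gcp", "azure"]
  | 7 => ["k8s", "kube"]
  | 8 => ["ai", "llm", "agent", "model"]
  | 9 => ["supply", "npm", "pypi"]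
  | 10 => ["dns"]
  | _ => []

def pvAny (g : Nat) (lbl : String) : Bool := (pvGrp g).any (fun k => PySem.Str.isIn k lbl)

theorem pvAny_eq0 (lbl : String) : pvAny 0 lbl = ((["apt", "ta4", "ta41", "dprk", "lazarus", "cozy"]).any (fun k => PySem.Str.isIn k lbl)) := rfl
theorem pvAny_eq1 (lbl : String) : pvAny 1 lbl = ((["cve", "zero-day", "vuln", "patch"]).any (fun k => PySem.Str.isIn k lbl)) := rfl
theorem pvAny_eq2 (lbl : String) : pvAny 2 lbl = ((["ransom", "lock"]).any (fun k => PySem.Str.isIn k lbl)) := rfl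
theorem pvAny_eq3 (lbl : String) : pvAny 3 lbl = ((["malware", "botnet", "worm", "trojan"]).any (fun k => PySem.Str.isIn k lbl)) := rfl
theorem pvAny_eq4 (lbl : String) : pvAny 4 lbl = ((["phish", "social"]).any (fun k => PySem.Str.isIn k lbl)) := rfl
theorem pvAny_eq5 (lbl : String) : pvAny 5 lbl = ((["docker", "container"]).any (fun k => PySem.Str.isIn k lbl)) := rfl
theorem pvAny_eq6 (lbl : String) : pvAny 6 lbl = ((["aws", "cloud", "gcp", "azure"]).any (fun k => PySem.Str.isIn k lbl)) := rfl
theorem pvAny_eq7 (lbl : String) : pvAny 7 lbl = ((["k8s", "kube"]).any (fun k => PySem.Str.isIn k lbl)) := rfl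
theorem pvAny_eq8 (lbl : String) : pvAny 8 lbl = ((["ai", "llm", "agent", "model"]).any (fun k => PySem.Str.isIn k lbl)) := rfl
theorem pvAny_eq9 (lbl : String) : pvAny 9 lbl = ((["supply", "npm", "pypi"]).any (fun k => PySem.Str.isIn k lbl)) := rfl
theorem pvAny_eq10 (lbl : String) : pvAny 10 lbl = ((["dns"]).any (fun k => PySem.Str.isIn k lbl)) := rfl

theorem pvIsIn_iff (sub s : String) : PySem.Str.isIn sub s = true ↔ sub.toList <:+: s.toList := by
  simp only [PySem.Str.isIn]
  exact PySem.Chars.isIn_iff_infix _ _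

theorem pvGrp_KW : ∀ g ≤ 10, ∀ k ∈ pvGrp g, (k, g) ∈ pvKW := by
  intro g hg
  interval_cases g <;> decide

theorem pvKW_Grp : ∀ kp ∈ pvKW, kp.1 ∈ pvGrp kp.2 ∧ kp.2 ≤ 10 ∧ kp.1.toList ≠ [] := by decide

theorem pvFoldl_le (l : List (String × Nat)) (s : List Char) (b : Nat) :
    (l.foldl (fun b kp => if kp.2 < b && kp.1.toList.isPrefixOf s then kp.2 else b) b) ≤ b := by
  induction l generalizing b with
  | nil => exact le_refl _
  | cons a t ih =>
      simp only [List.foldl_cons]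
      refine le_trans (ih _) ?_
      split
      · rename_i h
        rw [Bool.and_eq_true] at h
        simp only [decide_eq_true_eq] at h
        omega
      · exact le_refl _

theorem pvBestAt_le (s : List Char) (b : Nat) : pvBestAt s b ≤ b := pvFoldl_le _ _ _

theorem pvFoldl_hit (l : List (String × Nat)) (s : List Char) (b : Nat) (kw : String) (p : Nat)
    (hmem : (kw, p) ∈ l) (hpre : kw.toList.isPrefixOf s = true) :
    (l.foldl (fun b kp => if kp.2 < b && kp.1.toList.isPrefixOf s then kp.2 else b) b) ≤ p := by
  induction l generalizing b with
  | nil => cases hmem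
  | cons a t ih =>
      simp only [List.foldl_cons]
      rcases List.mem_cons.mp hmem with h | h
      · cases h
        refine le_trans (pvFoldl_le _ _ _) ?_
        simp only [hpre, Bool.and_true]
        split
        · exact le_refl _
        · rename_i h
          simp only [decide_eq_true_eq] at h
          omega
      · exact ih _ h

theorem pvFoldl_down (l : List (String × Nat)) (s : List Char) (b : Nat) :
    (l.foldl (fun b kp => if kp.2 < b && kp.1.toList.isPrefixOf s then kp.2 else b) b) = b ∨
      ∃ kp ∈ l, kp.1.toList.isPrefixOf s = true ∧
        (l.foldl (fun b kp => if kp.2 < b && kp.1.toList.isPrefixOf s then kp.2 else b) b) = kp.2 := by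
  induction l generalizing b with
  | nil => left; rfl
  | cons a t ih =>
      simp only [List.foldl_cons]
      rcases ih (if a.2 < b && a.1.toList.isPrefixOf s then a.2 else b) with h | ⟨kp, hkp, hpre, he⟩
      · by_cases hc : (a.2 < b && a.1.toList.isPrefixOf s) = true
        · right
          refine ⟨a, List.mem_cons_self .., ?_, by rw [h, if_pos hc]⟩
          rw [Bool.and_eq_true] at hc
          exact hc.2
        · left; rw [h, if_neg hc]
      · right; exact ⟨kp, List.mem_cons_of_mem _ hkp, hpre, he⟩

theorem pvScan_le (l : List Char) (b : Nat) : pvScan l b ≤ b := by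
  induction l generalizing b with
  | nil => exact le_refl _
  | cons c r ih => exact le_trans (ih _) (pvBestAt_le _ _)

theorem pvScan_hit (l : List Char) (b : Nat) (kw : String) (p : Nat)
    (hmem : (kw, p) ∈ pvKW) (hne : kw.toList ≠ []) (hinf : kw.toList <:+: l) :
    pvScan l b ≤ p := by
  induction l generalizing b with
  | nil =>
      rw [List.infix_nil] at hinf
      exact absurd hinf hne
  | cons c r ih =>
      have hstep : pvScan (c :: r) b = pvScan r (pvBestAt (c :: r) b) := rfl
      rw [hstep]
      rcases List.infix_cons_iff.mp hinf with h | h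
      · exact le_trans (pvScan_le _ _)
          (pvFoldl_hit _ _ _ _ _ hmem (List.isPrefixOf_iff_prefix.mpr h))
      · exact ih _ h

theorem pvScan_down (l : List Char) (b : Nat) :
    pvScan l b = b ∨ ∃ kp ∈ pvKW, kp.1.toList <:+: l ∧ pvScan l b = kp.2 := by
  induction l generalizing b with
  | nil => left; rfl
  | cons c r ih =>
      have hstep : pvScan (c :: r) b = pvScan r (pvBestAt (c :: r) b) := rfl
      rcases ih (pvBestAt (c :: r) b) with h | ⟨kp, hkp, hinf, he⟩
      · rcases pvFoldl_down pvKW (c :: r) b with h2 | ⟨kp, hkp, hpre, he⟩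
        · left; rw [hstep, h]; exact h2
        · right
          exact ⟨kp, hkp, List.IsPrefix.isInfix (List.isPrefixOf_iff_prefix.mp hpre),
            by rw [hstep, h]; exact he⟩
      · right; exact ⟨kp, hkp, List.infix_cons hinf, by rw [hstep]; exact he⟩

theorem pvHit_le (g : Nat) (lbl : String) (hg : g ≤ 10) (h : pvAny g lbl = true) :
    pvScan lbl.toList 11 ≤ g := by
  rcases List.any_eq_true.mp h with ⟨k, hk, hin⟩
  have hmem := pvGrp_KW g hg k hk
  have hne := (pvKW_Grp _ hmem).2.2
  exact pvScan_hit _ _ _ _ hmem hne ((pvIsIn_iff _ _).mp hin)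

theorem pvScan_char (lbl : String) :
    pvScan lbl.toList 11 = 11 ∨
      (pvScan lbl.toList 11 ≤ 10 ∧ pvAny (pvScan lbl.toList 11) lbl = true) := by
  rcases pvScan_down lbl.toList 11 with h | ⟨kp, hkp, hinf, he⟩
  · left; exact h
  · right
    obtain ⟨hgm, hle, -⟩ := pvKW_Grp _ hkp
    rw [he]
    exact ⟨hle, List.any_eq_true.mpr ⟨kp.1, hgm, (pvIsIn_iff _ _).mpr hinf⟩⟩

theorem pvScan_first (lbl : String) (g : Nat) (hg : g ≤ 10) (hyes : pvAny g lbl = true)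
    (hno : ∀ j < g, pvAny j lbl = false) : pvScan lbl.toList 11 = g := by
  have hle := pvHit_le g lbl hg hyes
  rcases pvScan_char lbl with h | ⟨-, hany⟩
  · omega
  · by_cases hlt : pvScan lbl.toList 11 < g
    · rw [hno _ hlt] at hany
      cases hany
    · omega

theorem pvScan_none (lbl : String) (hno : ∀ j ≤ 10, pvAny j lbl = false) :
    pvScan lbl.toList 11 = 11 := by
  rcases pvScan_char lbl with h | ⟨hle, hany⟩
  · exact h
  · rw [hno _ hle] at hany
    cases hany

-- ===== VERDICT =====
theorem card_icon_svg_py_spec : Claim_equal_card_icon_svg_py := by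
  intro label color _
  unfold Spec_card_icon_svg_py card_icon_svg_py card_icon_svg_py_alt
  show
    (
      if (["apt", "ta4", "ta41", "dprk", "lazarus", "cozy"]).any (fun k => PySem.Str.isIn k (PySem.Str.lower label)) then
        "<ellipse cx=\"0\" cy=\"-4\" rx=\"14\" ry=\"9\" fill=\"none\" stroke=\"" ++ color ++ "\" stroke-width=\"1.8\"/><circle cx=\"0\" cy=\"-4\" r=\"4\" fill=\"" ++ color ++ "\" opacity=\"0.7\"/>"
      else
      if (["cve", "zero-day", "vuln", "patch"]).any (fun k => PySem.Str.isIn k (PySem.Str.lower label)) then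
        "<path d=\"M0,-18 L16,12 L-16,12 Z\" fill=\"none\" stroke=\"" ++ color ++ "\" stroke-width=\"1.8\"/><text x=\"0\" y=\"6\" font-family=\"Courier New\" font-size=\"9\" font-weight=\"700\" fill=\"" ++ color ++ "\" text-anchor=\"middle\">CVE</text>"
      else
      if (["ransom", "lock"]).any (fun k => PySem.Str.isIn k (PySem.Str.lower label)) then
        "<rect x=\"-12\" y=\"-2\" width=\"24\" height=\"20\" rx=\"4\" fill=\"none\" stroke=\"" ++ color ++ "\" stroke-width=\"1.8\"/><path d=\"M-8,-2 v-10 c0-12 16-12 16,0 v10\" stroke=\"" ++ color ++ "\" stroke-width=\"2.2\" fill=\"none\" stroke-linecap=\"round\"/><circle cx=\"0\" cy=\"8\" r=\"3\" fill=\"" ++ color ++ "\"/>"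
      else
      if (["malware", "botnet", "worm", "trojan"]).any (fun k => PySem.Str.isIn k (PySem.Str.lower label)) then
        "<circle cx=\"0\" cy=\"-2\" r=\"10\" fill=\"none\" stroke=\"" ++ color ++ "\" stroke-width=\"1.8\"/><line x1=\"-10\" y1=\"-8\" x2=\"-18\" y2=\"-14\" stroke=\"" ++ color ++ "\" stroke-width=\"1.5\"/><line x1=\"10\" y1=\"-8\" x2=\"18\" y2=\"-14\" stroke=\"" ++ color ++ "\" stroke-width=\"1.5\"/><line x1=\"-10\" y1=\"2\" x2=\"-18\" y2=\"2\" stroke=\"" ++ color ++ "\" stroke-width=\"1.5\"/><line x1=\"10\" y1=\"2\" x2=\"18\" y2=\"2\" stroke=\"" ++ color ++ "\" stroke-width=\"1.5\"/>"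
      else
      if (["phish", "social"]).any (fun k => PySem.Str.isIn k (PySem.Str.lower label)) then
        "<path d=\"M-8,-14 C-8,-20 8,-20 8,-14 L8,6 C8,16 -8,16 -8,6 Z\" fill=\"none\" stroke=\"" ++ color ++ "\" stroke-width=\"1.8\"/><path d=\"M8,6 L18,16\" stroke=\"" ++ color ++ "\" stroke-width=\"2.5\" stroke-linecap=\"round\"/>"
      else
      if (["docker", "container"]).any (fun k => PySem.Str.isIn k (PySem.Str.lower label)) then
        "<rect x=\"-14\" y=\"-16\" width=\"10\" height=\"8\" rx=\"2\" fill=\"none\" stroke=\"" ++ color ++ "\" stroke-width=\"1.5\"/><rect x=\"-2\" y=\"-16\" width=\"10\" height=\"8\" rx=\"2\" fill=\"none\" stroke=\"" ++ color ++ "\" stroke-width=\"1.5\"/><rect x=\"-14\" y=\"-6\" width=\"10\" height=\"8\" rx=\"2\" fill=\"none\" stroke=\"" ++ color ++ "\" stroke-width=\"1.5\"/><rect x=\"-2\" y=\"-6\" width=\"10\" height=\"8\" rx=\"2\" fill=\"none\" stroke=\"" ++ color ++ "\" stroke-width=\"1.5\"/><path d=\"M-16,8 C-10,18 10,18 16,8\"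 fill=\"none\" stroke=\"" ++ color ++ "\" stroke-width=\"1.5\"/>"
      else
      if (["aws", "cloud", "gcp", "azure"]).any (fun k => PySem.Str.isIn k (PySem.Str.lower label)) then
        "<path d=\"M-16,8 C-24,8 -26,-2 -20,-8 C-18,-18 -6,-22 4,-18 C8,-26 20,-26 24,-16 C30,-16 32,-8 28,0 C26,8 16,8 8,8 Z\" fill=\"none\" stroke=\"" ++ color ++ "\" stroke-width=\"1.8\" transform=\"scale(0.65)\"/>"
      else
      if (["k8s", "kube"]).any (fun k => PySem.Str.isIn k (PySem.Str.lower label)) then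
        "<circle cx=\"0\" cy=\"0\" r=\"10\" fill=\"none\" stroke=\"" ++ color ++ "\" stroke-width=\"1.8\"/><circle cx=\"0\" cy=\"0\" r=\"4\" fill=\"" ++ color ++ "\" opacity=\"0.5\"/><line x1=\"0\" y1=\"-10\" x2=\"0\" y2=\"-18\" stroke=\"" ++ color ++ "\" stroke-width=\"2\"/><line x1=\"8.7\" y1=\"5\" x2=\"15.6\" y2=\"9\" stroke=\"" ++ color ++ "\" stroke-width=\"2\"/><line x1=\"-8.7\" y1=\"5\" x2=\"-15.6\" y2=\"9\" stroke=\"" ++ color ++ "\" stroke-width=\"2\"/>"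
      else
      if (["ai", "llm", "agent", "model"]).any (fun k => PySem.Str.isIn k (PySem.Str.lower label)) then
        "<circle cx=\"-12\" cy=\"-8\" r=\"4\" fill=\"none\" stroke=\"" ++ color ++ "\" stroke-width=\"1.5\"/><circle cx=\"12\" cy=\"-8\" r=\"4\" fill=\"none\" stroke=\"" ++ color ++ "\" stroke-width=\"1.5\"/><circle cx=\"0\" cy=\"8\" r=\"5\" fill=\"none\" stroke=\"" ++ color ++ "\" stroke-width=\"1.8\"/><line x1=\"-8\" y1=\"-6\" x2=\"-2\" y2=\"6\" stroke=\"" ++ color ++ "\" stroke-width=\"1.2\" opacity=\"0.7\"/><line x1=\"8\" y1=\"-6\" x2=\"2\" y2=\"6\" stroke=\"" ++ color ++ "\" stroke-width=\"1.2\" opacity=\"0.7\"/><line x1=\"-8\" y1=\"-8\" x2=\"8\" y2=\"-8\" stroke=\"" ++ color ++ "\" stroke-width=\"1.2\" opacity=\"0.5\"/>"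
      else
      if (["supply", "npm", "pypi"]).any (fun k => PySem.Str.isIn k (PySem.Str.lower label)) then
        "<ellipse cx=\"-8\" cy=\"0\" rx=\"10\" ry=\"6\" fill=\"none\" stroke=\"" ++ color ++ "\" stroke-width=\"1.8\"/><ellipse cx=\"8\" cy=\"0\" rx=\"10\" ry=\"6\" fill=\"none\" stroke=\"" ++ color ++ "\" stroke-width=\"1.8\"/>"
      else
      if (["dns"]).any (fun k => PySem.Str.isIn k (PySem.Str.lower label)) then
        "<circle cx=\"0\" cy=\"0\" r=\"14\" fill=\"none\" stroke=\"" ++ color ++ "\" stroke-width=\"1.5\"/><ellipse cx=\"0\" cy=\"0\" rx=\"7\" ry=\"14\" fill=\"none\" stroke=\"" ++ color ++ "\" stroke-width=\"1\"/><line x1=\"-14\" y1=\"0\" x2=\"14\" y2=\"0\" stroke=\"" ++ color ++ "\" stroke-width=\"1\" opacity=\"0.6\"/>"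
      else
        "<path d=\"M0,-16 L14,-8 L14,4 C14,12 8,16 0,20 C-8,16 -14,12 -14,4 L-14,-8 Z\" fill=\"none\" stroke=\"" ++ color ++ "\" stroke-width=\"1.8\"/>"
    ) = pvTemplate (pvScan (PySem.Str.lower label).toList 11) color
  by_cases h0 : ((["apt", "ta4", "ta41", "dprk", "lazarus", "cozy"]).any (fun k => PySem.Str.isIn k (PySem.Str.lower label))) = true
  · rw [if_pos h0, pvScan_first (PySem.Str.lower label) 0 (by omega)
      (by rw [pvAny_eq0]; exact h0)
      (fun j hj => absurd hj (by omega))]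
    rfl
  · rw [if_neg h0]
    by_cases h1 : ((["cve", "zero-day", "vuln", "patch"]).any (fun k => PySem.Str.isIn k (PySem.Str.lower label))) = true
    · rw [if_pos h1, pvScan_first (PySem.Str.lower label) 1 (by omega)
        (by rw [pvAny_eq1]; exact h1)
        (fun j hj => by interval_cases j <;> first | (rw [pvAny_eq0]; exact Bool.eq_false_iff.mpr h0))]
      rfl
    · rw [if_neg h1]
      by_cases h2 : ((["ransom", "lock"]).any (fun k => PySem.Str.isIn k (PySem.Str.lower label))) = true
      · rw [if_pos h2, pvScan_first (PySem.Str.lower label) 2 (by omega)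
          (by rw [pvAny_eq2]; exact h2)
          (fun j hj => by interval_cases j <;> first | (rw [pvAny_eq0]; exact Bool.eq_false_iff.mpr h0) | (rw [pvAny_eq1]; exact Bool.eq_false_iff.mpr h1))]
        rfl
      · rw [if_neg h2]
        by_cases h3 : ((["malware", "botnet", "worm", "trojan"]).any (fun k => PySem.Str.isIn k (PySem.Str.lower label))) = true
        · rw [if_pos h3, pvScan_first (PySem.Str.lower label) 3 (by omega)
            (by rw [pvAny_eq3]; exact h3)
            (fun j hj => by interval_cases j <;> first | (rw [pvAny_eq0]; exact Bool.eq_false_iff.mpr h0) | (rw [pvAny_eq1]; exact Bool.eq_false_iff.mpr h1) | (rw [pvAny_eq2]; exact Bool.eq_false_iff.mpr h2))]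
          rfl
        · rw [if_neg h3]
          by_cases h4 : ((["phish", "social"]).any (fun k => PySem.Str.isIn k (PySem.Str.lower label))) = true
          · rw [if_pos h4, pvScan_first (PySem.Str.lower label) 4 (by omega)
              (by rw [pvAny_eq4]; exact h4)
              (fun j hj => by interval_cases j <;> first | (rw [pvAny_eq0]; exact Bool.eq_false_iff.mpr h0) | (rw [pvAny_eq1]; exact Bool.eq_false_iff.mpr h1) | (rw [pvAny_eq2]; exact Bool.eq_false_iff.mpr h2) | (rw [pvAny_eq3]; exact Bool.eq_false_iff.mpr h3))]
            rfl
          · rw [if_neg h4]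
            by_cases h5 : ((["docker", "container"]).any (fun k => PySem.Str.isIn k (PySem.Str.lower label))) = true
            · rw [if_pos h5, pvScan_first (PySem.Str.lower label) 5 (by omega)
                (by rw [pvAny_eq5]; exact h5)
                (fun j hj => by interval_cases j <;> first | (rw [pvAny_eq0]; exact Bool.eq_false_iff.mpr h0) | (rw [pvAny_eq1]; exact Bool.eq_false_iff.mpr h1) | (rw [pvAny_eq2]; exact Bool.eq_false_iff.mpr h2) | (rw [pvAny_eq3]; exact Bool.eq_false_iff.mpr h3) | (rw [pvAny_eq4]; exact Bool.eq_false_iff.mpr h4))]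
              rfl
            · rw [if_neg h5]
              by_cases h6 : ((["aws", "cloud", "gcp", "azure"]).any (fun k => PySem.Str.isIn k (PySem.Str.lower label))) = true
              · rw [if_pos h6, pvScan_first (PySem.Str.lower label) 6 (by omega)
                  (by rw [pvAny_eq6]; exact h6)
                  (fun j hj => by interval_cases j <;> first | (rw [pvAny_eq0]; exact Bool.eq_false_iff.mpr h0) | (rw [pvAny_eq1]; exact Bool.eq_false_iff.mpr h1) | (rw [pvAny_eq2]; exact Bool.eq_false_iff.mpr h2) | (rw [pvAny_eq3]; exact Bool.eq_false_iff.mpr h3) | (rw [pvAny_eq4]; exact Bool.eq_false_iff.mpr h4) | (rw [pvAny_eq5]; exact Bool.eq_false_iff.mpr h5))]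
                rfl
              · rw [if_neg h6]
                by_cases h7 : ((["k8s", "kube"]).any (fun k => PySem.Str.isIn k (PySem.Str.lower label))) = true
                · rw [if_pos h7, pvScan_first (PySem.Str.lower label) 7 (by omega)
                    (by rw [pvAny_eq7]; exact h7)
                    (fun j hj => by interval_cases j <;> first | (rw [pvAny_eq0]; exact Bool.eq_false_iff.mpr h0) | (rw [pvAny_eq1]; exact Bool.eq_false_iff.mpr h1) | (rw [pvAny_eq2]; exact Bool.eq_false_iff.mpr h2) | (rw [pvAny_eq3]; exact Bool.eq_false_iff.mpr h3) | (rw [pvAny_eq4]; exact Bool.eq_false_iff.mpr h4) | (rw [pvAny_eq5]; exact Bool.eq_false_iff.mpr h5) | (rw [pvAny_eq6]; exact Bool.eq_false_iff.mpr h6))]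
                  rfl
                · rw [if_neg h7]
                  by_cases h8 : ((["ai", "llm", "agent", "model"]).any (fun k => PySem.Str.isIn k (PySem.Str.lower label))) = true
                  · rw [if_pos h8, pvScan_first (PySem.Str.lower label) 8 (by omega)
                      (by rw [pvAny_eq8]; exact h8)
                      (fun j hj => by interval_cases j <;> first | (rw [pvAny_eq0]; exact Bool.eq_false_iff.mpr h0) | (rw [pvAny_eq1]; exact Bool.eq_false_iff.mpr h1) | (rw [pvAny_eq2]; exact Bool.eq_false_iff.mpr h2) | (rw [pvAny_eq3]; exact Bool.eq_false_iff.mpr h3) | (rw [pvAny_eq4]; exact Bool.eq_false_iff.mpr h4) | (rw [pvAny_eq5]; exact Bool.eq_false_iff.mpr h5) | (rw [pvAny_eq6]; exact Bool.eq_false_iff.mpr h6) | (rw [pvAny_eq7]; exact Bool.eq_false_iff.mpr h7))]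
                    rfl
                  · rw [if_neg h8]
                    by_cases h9 : ((["supply", "npm", "pypi"]).any (fun k => PySem.Str.isIn k (PySem.Str.lower label))) = true
                    · rw [if_pos h9, pvScan_first (PySem.Str.lower label) 9 (by omega)
                        (by rw [pvAny_eq9]; exact h9)
                        (fun j hj => by interval_cases j <;> first | (rw [pvAny_eq0]; exact Bool.eq_false_iff.mpr h0) | (rw [pvAny_eq1]; exact Bool.eq_false_iff.mpr h1) | (rw [pvAny_eq2]; exact Bool.eq_false_iff.mpr h2) | (rw [pvAny_eq3]; exact Bool.eq_false_iff.mpr h3) | (rw [pvAny_eq4]; exact Bool.eq_false_iff.mpr h4) | (rw [pvAny_eq5]; exact Bool.eq_false_iff.mpr h5) | (rw [pvAny_eq6]; exact Bool.eq_false_iff.mpr h6) | (rw [pvAny_eq7]; exact Bool.eq_false_iff.mpr h7) | (rw [pvAny_eq8]; exact Bool.eq_false_iff.mpr h8))]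
                      rfl
                    · rw [if_neg h9]
                      by_cases h10 : ((["dns"]).any (fun k => PySem.Str.isIn k (PySem.Str.lower label))) = true
                      · rw [if_pos h10, pvScan_first (PySem.Str.lower label) 10 (by omega)
                          (by rw [pvAny_eq10]; exact h10)
                          (fun j hj => by interval_cases j <;> first | (rw [pvAny_eq0]; exact Bool.eq_false_iff.mpr h0) | (rw [pvAny_eq1]; exact Bool.eq_false_iff.mpr h1) | (rw [pvAny_eq2]; exact Bool.eq_false_iff.mpr h2) | (rw [pvAny_eq3]; exact Bool.eq_false_iff.mpr h3) | (rw [pvAny_eq4]; exact Bool.eq_false_iff.mpr h4) | (rw [pvAny_eq5]; exact Bool.eq_false_iff.mpr h5) | (rw [pvAny_eq6]; exact Bool.eq_false_iff.mpr h6) | (rw [pvAny_eq7]; exact Bool.eq_false_iff.mpr h7) | (rw [pvAny_eq8]; exact Bool.eq_false_iff.mpr h8) | (rw [pvAny_eq9]; exact Bool.eq_false_iff.mpr h9))]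
                        rfl
                      · rw [if_neg h10]
                        rw [pvScan_none (PySem.Str.lower label)
                          (fun j hj => by interval_cases j <;> first | (rw [pvAny_eq0]; exact Bool.eq_false_iff.mpr h0) | (rw [pvAny_eq1]; exact Bool.eq_false_iff.mpr h1) | (rw [pvAny_eq2]; exact Bool.eq_false_iff.mpr h2) | (rw [pvAny_eq3]; exact Bool.eq_false_iff.mpr h3) | (rw [pvAny_eq4]; exact Bool.eq_false_iff.mpr h4) | (rw [pvAny_eq5]; exact Bool.eq_false_iff.mpr h5) | (rw [pvAny_eq6]; exact Bool.eq_false_iff.mpr h6) | (rw [pvAny_eq7]; exact Bool.eq_false_iff.mpr h7) | (rw [pvAny_eq8]; exact Bool.eq_false_iff.mpr h8) | (rw [pvAny_eq9]; exact Bool.eq_false_iff.mpr h9) | (rw [pvAny_eq10]; exact Bool.eq_false_iff.mpr h10))]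
                        rfl
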